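-- pv_equiv track=rewrite | github.com/danielomesi/Signals-Manipulation | Signal Manipulation.py | AddSignals
-- ===== SOURCE A (Python) =====
-- def AddSignals(x1,x2):
--      difference=x1[1]-x2[1]
--      if (difference>0):
--         minSignalArr=list(x2[0])
--         maxSignalArr=list(x1[0])
--         minIndex=x2[1]
--      else:
--         minSignalArr=list(x1[0])
--         maxSignalArr=list(x2[0])
--         minIndex=x1[1]
--      startAbsDiff=abs(difference)
--      for i in range(startAbsDiff):
--          maxSignalArr.insert(0,0)
--      endDiff=len(maxSignalArr)-len(minSignalArr)
--      if (endDiff<0):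
--          temp=list(maxSignalArr)
--          maxSignalArr=list(minSignalArr)
--          minSignalArr=list(temp)
--      endAbsDiff=abs(endDiff)
--      for i in range(endAbsDiff):
--         minSignalArr.append(0)
--
--      return (sumTwoLists(minSignalArr,maxSignalArr),minIndex)
--
-- def sumTwoLists(lst1,lst2):
--     resLst=[]
--     for i in range(len(lst1)):
--         resLst.append(lst1[i]+lst2[i])
--
--     return resLst
-- ===== SOURCE B (Python) =====
-- def _contrib(a, s, p):
--     j = p - s
--     return a[j] if 0 <= j < len(a) else 0
--
-- def AddSignals(x1, x2):
--     a1, s1 = x1[0], x1[1]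
--     a2, s2 = x2[0], x2[1]
--     lo = min(s1, s2)
--     hi = max(s1 + len(a1), s2 + len(a2))
--     return ([_contrib(a1, s1, p) + _contrib(a2, s2, p) for p in range(lo, hi)], lo)
-- ===== Notes on version B (the rewrite author's own statement) =====
-- stated objective: faster
-- what changed: Replaces A's strategy of padding both arrays (repeated insert(0,0), which shifts the whole array each time) and then zipping, by a single bounds-driven pass: compute the absolute index range [min start, max end) once and accumulate each signal's contribution directly per position.
import Mathlib
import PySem

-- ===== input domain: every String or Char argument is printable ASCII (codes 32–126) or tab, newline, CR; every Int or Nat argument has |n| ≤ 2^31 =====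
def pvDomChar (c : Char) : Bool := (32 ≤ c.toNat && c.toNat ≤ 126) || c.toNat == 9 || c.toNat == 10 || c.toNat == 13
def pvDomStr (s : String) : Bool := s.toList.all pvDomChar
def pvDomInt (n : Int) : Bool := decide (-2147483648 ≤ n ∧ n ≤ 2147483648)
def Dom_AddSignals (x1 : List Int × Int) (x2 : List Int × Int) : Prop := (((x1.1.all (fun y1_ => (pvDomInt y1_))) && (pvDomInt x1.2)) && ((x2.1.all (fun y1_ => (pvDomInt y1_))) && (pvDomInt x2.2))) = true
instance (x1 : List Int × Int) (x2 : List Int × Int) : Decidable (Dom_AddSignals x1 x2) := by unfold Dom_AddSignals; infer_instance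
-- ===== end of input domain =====

-- B replaces A's pad-both-arrays-then-zip strategy by one direct accumulation pass over the
-- absolute index range; same results, simpler code.

-- ===== PORT A =====
-- sumTwoLists: 'lst2[i]' would raise IndexError were lst2 shorter than lst1; AddSignals always
-- calls it with equal lengths, so the 0-default of pyGetD is never taken (port exact there).
def sumTwoLists (lst1 lst2 : List Int) : List Int :=
  (List.range lst1.length).foldl
    (fun resLst (i : Nat) => resLst ++ [PySem.List.pyGetD lst1 (i : Int) 0 + PySem.List.pyGetD lst2 (i : Int) 0]) []

def AddSignals (x1 : List Int × Int) (x2 : List Int × Int) : List Int × Int :=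
  let difference := x1.2 - x2.2
  let t := if difference > 0 then (x2.1, x1.1, x2.2) else (x1.1, x2.1, x1.2)
  let minSignalArr := t.1
  let maxSignalArr := t.2.1
  let minIndex := t.2.2
  let startAbsDiff := difference.natAbs
  let maxSignalArr := (List.range startAbsDiff).foldl (fun arr _ => PySem.List.insert arr 0 (0:Int)) maxSignalArr
  let endDiff : Int := (maxSignalArr.length : Int) - (minSignalArr.length : Int)
  let p := if endDiff < 0 then (maxSignalArr, minSignalArr) else (minSignalArr, maxSignalArr)
  let minSignalArr := p.1
  let maxSignalArr := p.2
  let endAbsDiff := endDiff.natAbs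
  let minSignalArr := (List.range endAbsDiff).foldl (fun arr _ => arr ++ [(0:Int)]) minSignalArr
  (sumTwoLists minSignalArr maxSignalArr, minIndex)

-- ===== PORT B =====
def contribB (a : List Int) (s p : Int) : Int :=
  let j := p - s
  if 0 ≤ j ∧ j < (a.length : Int) then PySem.List.pyGetD a j 0 else 0

def AddSignals_alt (x1 : List Int × Int) (x2 : List Int × Int) : List Int × Int :=
  let a1 := x1.1; let s1 := x1.2
  let a2 := x2.1; let s2 := x2.2
  let lo := min s1 s2
  let hi := max (s1 + (a1.length : Int)) (s2 + (a2.length : Int))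
  ((PySem.List.pyRange lo hi 1).map (fun p => contribB a1 s1 p + contribB a2 s2 p), lo)

-- ===== PRECONDITION & SPEC =====
def Spec_AddSignals (x1 : List Int × Int) (x2 : List Int × Int) (out : List Int × Int) : Prop := out = AddSignals_alt x1 x2
instance (x1 : List Int × Int) (x2 : List Int × Int) (out : List Int × Int) : Decidable (Spec_AddSignals x1 x2 out) := by unfold Spec_AddSignals; infer_instance

-- ===== CLAIM (what is proved, stated in full; the proofs are below) =====
def Claim_equal_AddSignals : Prop := ∀ (x1 : List Int × Int) (x2 : List Int × Int), Dom_AddSignals x1 x2 → Spec_AddSignals x1 x2 (AddSignals x1 x2)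

-- ===== LEMMAS AND PROOFS =====

theorem insert_zero (xs : List Int) (v : Int) : PySem.List.insert xs 0 v = v :: xs := by
  simp [PySem.List.insert, PySem.List.sliceIndices]

theorem foldl_cons_zero (k : Nat) (xs : List Int) :
    (List.range k).foldl (fun arr _ => PySem.List.insert arr 0 (0:Int)) xs
      = List.replicate k 0 ++ xs := by
  induction k with
  | zero => simp
  | succ k ih =>
      rw [List.range_succ, List.foldl_append, ih]
      simp [insert_zero, List.replicate_succ]

theorem foldl_append_zero (k : Nat) (xs : List Int) :
    (List.range k).foldl (fun arr _ => arr ++ [(0:Int)]) xs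
      = xs ++ List.replicate k 0 := by
  induction k with
  | zero => simp
  | succ k ih =>
      rw [List.range_succ, List.foldl_append, ih]
      simp [List.replicate_succ']

theorem sumTwoLists_eq_map (l1 l2 : List Int) :
    sumTwoLists l1 l2 = (List.range l1.length).map (fun i => l1.getD i 0 + l2.getD i 0) := by
  unfold sumTwoLists
  rw [PySem.List.foldl_append_singleton_eq_map]
  simp only [List.nil_append]
  apply List.map_congr_left
  intro i _
  simp [List.getD]

-- getD through right-padding with zeros is invisible (both sides default to 0)
theorem getD_append_replicate (xs : List Int) (e i : Nat) :
    (xs ++ List.replicate e (0:Int)).getD i 0 = xs.getD i 0 := by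
  by_cases h : i < xs.length
  · simp [List.getD, List.getElem?_append_left h]
  · simp only [List.getD, List.getElem?_append_right (by omega : xs.length ≤ i),
      List.getElem?_replicate]
    rw [List.getElem?_eq_none (by omega : xs.length ≤ i)]
    split <;> simp

theorem getD_replicate_append (M : List Int) (d k : Nat) :
    (List.replicate d (0:Int) ++ M).getD k 0
      = if d ≤ k ∧ k < d + M.length then M.getD (k - d) 0 else 0 := by
  by_cases h : k < d
  · rw [if_neg (by omega)]
    rw [List.getD, List.getElem?_append_left (show k < (List.replicate d (0:Int)).length by simpa using h)]
    simp [h]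
  · rw [List.getD, List.getElem?_append_right (by simpa using not_lt.mp h)]
    simp only [List.length_replicate]
    by_cases h2 : k < d + M.length
    · rw [if_pos ⟨by omega, h2⟩, List.getD]
    · rw [if_neg (by omega), List.getElem?_eq_none (by omega : M.length ≤ k - d)]
      rfl

theorem contribB_self (a : List Int) (s : Int) (k : Nat) :
    contribB a s (s + (k : Int)) = a.getD k 0 := by
  unfold contribB
  have hj : s + (k:Int) - s = (k:Int) := by ring
  rw [hj]
  by_cases h : (k:Int) < (a.length : Int)
  · rw [if_pos ⟨Int.natCast_nonneg k, h⟩]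
    simp
  · rw [if_neg (by tauto), List.getD_eq_default _ _ (by exact_mod_cast not_lt.mp h)]

theorem contribB_shift (M : List Int) (sm : Int) (d k : Nat) :
    contribB M (sm + (d:Int)) (sm + (k:Int)) = (List.replicate d (0:Int) ++ M).getD k 0 := by
  unfold contribB
  rw [getD_replicate_append]
  have hj : sm + (k:Int) - (sm + (d:Int)) = (k:Int) - (d:Int) := by ring
  rw [hj]
  by_cases h : d ≤ k ∧ k < d + M.length
  · rw [if_pos (by omega), if_pos h]
    rw [PySem.List.pyGetD_eq_getElem M 0 (by omega) (by omega)]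
    rw [List.getD_eq_getElem M 0 (by omega : k - d < M.length)]
    congr 1
    omega
  · rw [if_neg (by omega), if_neg h]

-- A's common tail (pad then zip) written out, equated to a map over absolute offsets
theorem coreA (m M : List Int) (d : Nat) :
    (let M' := List.replicate d (0:Int) ++ M
     let endDiff : Int := (M'.length : Int) - (m.length : Int)
     let p := if endDiff < 0 then (M', m) else (m, M')
     sumTwoLists ((List.range endDiff.natAbs).foldl (fun arr _ => arr ++ [(0:Int)]) p.1) p.2)
    = (List.range (max m.length (d + M.length))).map
        (fun k => m.getD k 0 + (List.replicate d (0:Int) ++ M).getD k 0) := by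
  simp only []
  set M' := List.replicate d (0:Int) ++ M with hM'
  have hlen : M'.length = d + M.length := by simp [hM']
  by_cases h : ((M'.length : Int) - (m.length : Int)) < 0
  · rw [if_pos h]
    simp only [foldl_append_zero, sumTwoLists_eq_map]
    have he : (((M'.length : Int) - (m.length : Int)).natAbs) = m.length - M'.length := by omega
    have hl : (M' ++ List.replicate (((M'.length:Int) - (m.length:Int)).natAbs) (0:Int)).length
        = m.length := by simp [he]; omega
    rw [hl]
    have hmax : max m.length (d + M.length) = m.length := by omega
    rw [hmax]
    apply List.map_congr_left
    intro k _
    rw [getD_append_replicate]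
    exact add_comm _ _
  · rw [if_neg h]
    simp only [foldl_append_zero, sumTwoLists_eq_map]
    have he : (((M'.length : Int) - (m.length : Int)).natAbs) = M'.length - m.length := by omega
    have hl : (m ++ List.replicate (((M'.length:Int) - (m.length:Int)).natAbs) (0:Int)).length
        = d + M.length := by simp [he]; omega
    rw [hl]
    have hmax : max m.length (d + M.length) = d + M.length := by omega
    rw [hmax]
    apply List.map_congr_left
    intro k _
    rw [getD_append_replicate]

-- B's pass over the absolute index range, in the same normal form
theorem coreB (m M : List Int) (sm : Int) (d : Nat) :
    (PySem.List.pyRange sm (max (sm + (m.length:Int)) ((sm + (d:Int)) + (M.length:Int))) 1).map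
      (fun p => contribB m sm p + contribB M (sm + (d:Int)) p)
    = (List.range (max m.length (d + M.length))).map
        (fun k => m.getD k 0 + (List.replicate d (0:Int) ++ M).getD k 0) := by
  rw [PySem.List.pyRange_one, List.map_map]
  have hN : ((max (sm + (m.length:Int)) ((sm + (d:Int)) + (M.length:Int))) - sm).toNat
      = max m.length (d + M.length) := by
    rcases le_total (sm + (m.length:Int)) ((sm + (d:Int)) + (M.length:Int)) with h | h <;> omega
  rw [hN]
  apply List.map_congr_left
  intro k _
  simp only [Function.comp_apply]
  rw [contribB_self, contribB_shift]

-- ===== VERDICT (by name: the statement is the Claim_ definition above) =====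
theorem AddSignals_spec : Claim_equal_AddSignals := by
  unfold Claim_equal_AddSignals
  intro x1 x2 _
  unfold Spec_AddSignals AddSignals AddSignals_alt
  obtain ⟨a1, s1⟩ := x1
  obtain ⟨a2, s2⟩ := x2
  simp only []
  by_cases hd : s1 - s2 > 0
  · rw [if_pos hd]
    simp only [foldl_cons_zero]
    have hmin : min s1 s2 = s2 := by omega
    have hsd : s2 + (((s1 - s2).natAbs : Nat) : Int) = s1 := by omega
    refine Prod.ext ?_ (by simp [hmin])
    have hB := coreB a2 a1 s2 (s1 - s2).natAbs
    rw [hsd] at hB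
    have hA := coreA a2 a1 (s1 - s2).natAbs
    simp only [] at hA
    rw [hA, ← hB, hmin, max_comm (s1 + (a1.length:Int)) (s2 + (a2.length:Int))]
    apply List.map_congr_left
    intro p _
    exact add_comm _ _
  · rw [if_neg hd]
    simp only [foldl_cons_zero]
    have hmin : min s1 s2 = s1 := by omega
    have hsd : s1 + (((s1 - s2).natAbs : Nat) : Int) = s2 := by omega
    refine Prod.ext ?_ (by simp [hmin])
    have hB := coreB a1 a2 s1 (s1 - s2).natAbs
    rw [hsd] at hB
    have hA := coreA a1 a2 (s1 - s2).natAbs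
    simp only [] at hA
    rw [hA, ← hB, hmin]
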